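-- pv_equiv track=rewrite | github.com/lbellows/blog | scripts/common/memes.py | extract_tldr_line
-- ===== SOURCE A (Python) =====
-- from typing import Optional
--
-- def extract_tldr_line(markdown_body: str) -> Optional[str]:
--     lines = markdown_body.splitlines()
--     for idx, line in enumerate(lines):
--         if "**TL;DR**" in line:
--             after = line.split("**TL;DR**", 1)[1].strip(" :\t")
--             if after:
--                 return after
--             for nxt in lines[idx + 1:]:
--                 stripped = nxt.strip()
--                 if stripped:
--                     return stripped
--             break
--     return None
-- ===== SOURCE B (Python) =====
-- from typing import Optional
--
--
-- def extract_tldr_line(markdown_body: str) -> Optional[str]: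
--     parts = markdown_body.split("**TL;DR**", 1)
--     if len(parts) < 2:
--         return None
--     rest_lines = parts[1].splitlines()
--     if rest_lines:
--         head = rest_lines[0].strip(" :\t")
--         if head:
--             return head
--         for nxt in rest_lines[1:]:
--             stripped = nxt.strip()
--             if stripped:
--                 return stripped
--     return None
-- ===== Notes on version B (the rewrite author's own statement) =====
-- stated objective: simpler
-- what changed: B replaces A's line-by-line scan (splitlines first, then search each line for the TL;DR marker and re-split the matching line) by one substring split of the whole body on the marker followed by splitting only the remainder into lines and one flat scan for the fallback line.
import Mathlib
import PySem

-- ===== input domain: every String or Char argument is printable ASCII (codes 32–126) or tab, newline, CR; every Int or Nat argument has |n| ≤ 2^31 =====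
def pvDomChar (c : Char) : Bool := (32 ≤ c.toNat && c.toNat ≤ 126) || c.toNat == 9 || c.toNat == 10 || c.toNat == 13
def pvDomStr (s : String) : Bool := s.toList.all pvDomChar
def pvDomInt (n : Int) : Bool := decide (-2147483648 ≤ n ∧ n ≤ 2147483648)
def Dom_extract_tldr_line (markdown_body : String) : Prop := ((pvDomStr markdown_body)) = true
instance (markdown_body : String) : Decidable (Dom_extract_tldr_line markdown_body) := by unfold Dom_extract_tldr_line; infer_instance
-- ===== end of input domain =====

-- B replaces A's per-line marker scan by one substring split of the whole body on the TL;DR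
-- marker followed by a flat scan of the remainder's lines (objective: simpler decomposition).


-- ===== PORT A =====
-- A's inner fallback loop: `for nxt in lines[idx+1:]: stripped = nxt.strip(); if stripped: return stripped`
def tldrFallback : List (List Char) → Option (List Char)
  | [] => none
  | l :: rest =>
    let stripped := PySem.Chars.strip l
    if stripped.isEmpty then tldrFallback rest else some stripped

-- A's outer loop over `enumerate(lines)`; `lines[idx+1:]` is the structural tail `rest`.
-- `line.split("**TL;DR**", 1)[1]` is guarded by `"**TL;DR**" in line`, so index 1 exists; `.getD 1 []` reads it.
def tldrScan : List (List Char) → Option (List Char)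
  | [] => none
  | line :: rest =>
    if PySem.Chars.isIn "**TL;DR**".toList line then
      let after := PySem.Chars.stripChars ((PySem.Chars.splitOnMax line "**TL;DR**".toList 1).getD 1 []) " :\t".toList
      if after.isEmpty then tldrFallback rest else some after
    else tldrScan rest

def extract_tldr_line (markdown_body : String) : Option String :=
  (tldrScan (PySem.Chars.splitlines markdown_body.toList)).map String.ofList

-- ===== PORT B =====
-- Source B's fallback loop: `for nxt in rest_lines[1:]: stripped = nxt.strip(); if stripped: return stripped`
def tldrFirstNonEmpty : List (List Char) → Option (List Char)
  | [] => none
  | l :: rest =>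
    let stripped := PySem.Chars.strip l
    if stripped.isEmpty then tldrFirstNonEmpty rest else some stripped

-- Source B after the split: `rest_lines = parts[1].splitlines()`; head strip, else fallback scan
def tldrAfterMarker (rest : List Char) : Option (List Char) :=
  match PySem.Chars.splitlines rest with
  | [] => none
  | h :: t =>
    let head := PySem.Chars.stripChars h " :\t".toList
    if head.isEmpty then tldrFirstNonEmpty t else some head

-- `parts = markdown_body.split("**TL;DR**", 1); if len(parts) < 2: return None`
def tldrCoreB (s : List Char) : Option (List Char) :=
  let parts := PySem.Chars.splitOnMax s "**TL;DR**".toList 1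
  if parts.length < 2 then none
  else tldrAfterMarker (parts.getD 1 [])

def extract_tldr_line_alt (markdown_body : String) : Option String :=
  (tldrCoreB markdown_body.toList).map String.ofList

-- ===== PRECONDITION & SPEC =====
def Spec_extract_tldr_line (markdown_body : String) (out : Option String) : Prop := out = extract_tldr_line_alt markdown_body
instance (markdown_body : String) (out : Option String) : Decidable (Spec_extract_tldr_line markdown_body out) := by unfold Spec_extract_tldr_line; infer_instance

-- ===== CLAIM (what is proved, stated in full; the proofs are below) =====
def Claim_equal_extract_tldr_line : Prop := ∀ (markdown_body : String), Dom_extract_tldr_line markdown_body → Spec_extract_tldr_line markdown_body (extract_tldr_line markdown_body)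

-- ===== LEMMAS AND PROOFS =====

-- the line-break predicate of PySem.Chars.splitlines, as a named function
def pyIsB (c : Char) : Bool :=
  decide (c.toNat = 10) || decide (c.toNat = 13) || decide (c.toNat = 11) || decide (c.toNat = 12) ||
    decide (c.toNat = 28) || decide (c.toNat = 29) || decide (c.toNat = 30) || decide (c.toNat = 133) ||
    decide (c.toNat = 8232) || decide (c.toNat = 8233)

def pvMark : List Char := "**TL;DR**".toList

theorem pvMark_chars : pvMark = ['*', '*', 'T', 'L', ';', 'D', 'R', '*', '*'] := rfl

theorem pvMark_breakfree : ∀ c ∈ pvMark, pyIsB c = false := by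
  rw [pvMark_chars]; intro c hc; fin_cases hc <;> rfl

theorem pvMark_length : pvMark.length = 9 := by rw [pvMark_chars]; rfl

theorem pvMark_ne_nil : pvMark ≠ [] := by rw [pvMark_chars]; simp

theorem splitlines_eq (s : List Char) :
    PySem.Chars.splitlines s = PySem.Chars.splitlines.go pyIsB s [] [] := rfl

-- step lemmas for splitlines.go
theorem go_nil (isB : Char → Bool) (cur : List Char) (acc : List (List Char)) :
    PySem.Chars.splitlines.go isB [] cur acc =
      if cur.isEmpty then acc.reverse else (cur.reverse :: acc).reverse := rfl

set_option maxRecDepth 4096 in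
theorem go_crlf (isB : Char → Bool) (rest cur : List Char) (acc : List (List Char)) :
    PySem.Chars.splitlines.go isB ('\r' :: '\n' :: rest) cur acc =
      PySem.Chars.splitlines.go isB rest [] (cur.reverse :: acc) := rfl

theorem go_step (isB : Char → Bool) (c : Char) (rest cur : List Char) (acc : List (List Char))
    (hc : ¬ (c = '\r' ∧ rest.head? = some '\n')) :
    PySem.Chars.splitlines.go isB (c :: rest) cur acc =
      if isB c then PySem.Chars.splitlines.go isB rest [] (cur.reverse :: acc)
      else PySem.Chars.splitlines.go isB rest (c :: cur) acc := by
  rw [PySem.Chars.splitlines.go.eq_def]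
  split
  · simp_all
  · rename_i h; injection h with h1 h2
    exact absurd ⟨h1, by rw [h2]; rfl⟩ hc
  · rename_i h; injection h with h1 h2; subst h1; subst h2; rfl

-- G1: the accumulator factors out
theorem go_acc (isB : Char → Bool) :
    ∀ (n : Nat) (b : List Char), b.length ≤ n → ∀ (cur : List Char) (acc : List (List Char)),
      PySem.Chars.splitlines.go isB b cur acc = acc.reverse ++ PySem.Chars.splitlines.go isB b cur [] := by
  intro n
  induction n with
  | zero =>
    intro b hb cur acc
    have : b = [] := List.length_eq_zero_iff.mp (Nat.le_zero.mp hb)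
    subst this
    rw [go_nil, go_nil]
    by_cases h : cur.isEmpty <;> simp [h]
  | succ n ih =>
    intro b hb cur acc
    match b with
    | [] =>
      rw [go_nil, go_nil]
      by_cases h : cur.isEmpty <;> simp [h]
    | c :: rest =>
      by_cases hcr : c = '\r' ∧ rest.head? = some '\n'
      · obtain ⟨rfl, hh⟩ := hcr
        cases rest with
        | nil => simp at hh
        | cons d t =>
          have hd : d = '\n' := by simpa using hh
          subst hd
          rw [go_crlf, go_crlf]
          rw [ih t (by simp at hb; omega) [] (cur.reverse :: acc),
              ih t (by simp at hb; omega) [] ([cur.reverse])]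
          simp
      · rw [go_step isB c rest cur acc hcr, go_step isB c rest cur [] hcr]
        by_cases hc : isB c
        · simp only [hc, if_pos]
          rw [ih rest (by simp at hb; omega) [] (cur.reverse :: acc),
              ih rest (by simp at hb; omega) [] ([cur.reverse])]
          simp
        · simp only [hc, Bool.false_eq_true, if_neg, not_false_eq_true]
          rw [ih rest (by simp at hb; omega) (c :: cur) acc]

-- glue: prepending pending (reversed) characters to the first produced line
def glueLine (cur : List Char) (ls : List (List Char)) : List (List Char) :=
  match ls with
  | [] => if cur.isEmpty then [] else [cur.reverse]
  | h :: t => (cur.reverse ++ h) :: t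

theorem glue_fuse (x y : List Char) (ls : List (List Char)) :
    glueLine x (glueLine y ls) = glueLine (y ++ x) ls := by
  match ls with
  | [] =>
    by_cases hy : y.isEmpty
    · have : y = [] := by simpa [List.isEmpty_iff] using hy
      subst this; simp [glueLine]
    · have hy' : y ≠ [] := by simpa [List.isEmpty_iff] using hy
      simp [glueLine, List.isEmpty_iff, hy']
  | h :: t => simp [glueLine]

-- G2: a pending `cur` glues onto the plain result
theorem go_glue :
    ∀ (n : Nat) (b : List Char), b.length ≤ n → ∀ (cur : List Char),
      PySem.Chars.splitlines.go pyIsB b cur [] =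
        glueLine cur (PySem.Chars.splitlines.go pyIsB b [] []) := by
  intro n
  induction n with
  | zero =>
    intro b hb cur
    have : b = [] := List.length_eq_zero_iff.mp (Nat.le_zero.mp hb)
    subst this
    rw [go_nil, go_nil]
    simp [glueLine]
  | succ n ih =>
    intro b hb cur
    match b with
    | [] => rw [go_nil, go_nil]; simp [glueLine]
    | c :: rest =>
      by_cases hcr : c = '\r' ∧ rest.head? = some '\n'
      · obtain ⟨rfl, hh⟩ := hcr
        cases rest with
        | nil => simp at hh
        | cons d t =>
          have hd : d = '\n' := by simpa using hh
          subst hd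
          rw [go_crlf, go_crlf]
          rw [go_acc pyIsB t.length t le_rfl [] ([cur.reverse]),
              go_acc pyIsB t.length t le_rfl [] ([([] : List Char).reverse])]
          simp [glueLine]
      · rw [go_step pyIsB c rest cur [] hcr, go_step pyIsB c rest [] [] hcr]
        by_cases hc : pyIsB c
        · simp only [hc, if_pos]
          rw [go_acc pyIsB rest.length rest le_rfl [] ([cur.reverse]),
              go_acc pyIsB rest.length rest le_rfl [] ([([] : List Char).reverse])]
          simp [glueLine]
        · simp only [hc, Bool.false_eq_true, if_neg, not_false_eq_true]
          have h1 := ih rest (by simp at hb; omega) (c :: cur)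
          have h2 := ih rest (by simp at hb; omega) ([c])
          rw [h1, h2, glue_fuse]
          rfl

-- walking a break-free block
theorem go_walk (x : List Char) (hx : ∀ c ∈ x, pyIsB c = false) :
    ∀ (y cur : List Char) (acc : List (List Char)),
      PySem.Chars.splitlines.go pyIsB (x ++ y) cur acc =
        PySem.Chars.splitlines.go pyIsB y (x.reverse ++ cur) acc := by
  induction x with
  | nil => intro y cur acc; simp
  | cons c t ihx =>
    intro y cur acc
    have hc : pyIsB c = false := hx c (List.mem_cons_self ..)
    have hcr : ¬ (c = '\r' ∧ (t ++ y).head? = some '\n') := by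
      rintro ⟨rfl, -⟩
      exact absurd hc (by decide)
    rw [List.cons_append, go_step pyIsB c (t ++ y) cur acc hcr, if_neg (by simp [hc])]
    rw [ihx (fun d hd => hx d (List.mem_cons_of_mem _ hd)) y (c :: cur) acc]
    simp

theorem splitlines_append_breakfree (x y : List Char) (hx : ∀ c ∈ x, pyIsB c = false) :
    PySem.Chars.splitlines (x ++ y) = glueLine x.reverse (PySem.Chars.splitlines y) := by
  rw [splitlines_eq, go_walk x hx y [] [], List.append_nil,
      go_glue y.length y le_rfl x.reverse, splitlines_eq]

theorem splitlines_breakfree (x : List Char) (hx : ∀ c ∈ x, pyIsB c = false) :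
    PySem.Chars.splitlines x = if x = [] then [] else [x] := by
  have h := splitlines_append_breakfree x [] hx
  simp only [List.append_nil] at h
  rw [h]
  have h0 : PySem.Chars.splitlines ([] : List Char) = [] := rfl
  rw [h0]
  by_cases hx0 : x = []
  · subst hx0; simp [glueLine]
  · have hne : ¬ x.reverse.isEmpty := by
      simp only [List.isEmpty_iff, List.reverse_eq_nil_iff]
      exact hx0
    simp [glueLine, hne, hx0]

-- peeling one break sequence off the front
theorem splitlines_crlf (t : List Char) :
    PySem.Chars.splitlines ('\r' :: '\n' :: t) = [] :: PySem.Chars.splitlines t := by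
  rw [splitlines_eq, go_crlf, go_acc pyIsB t.length t le_rfl [] _, splitlines_eq]
  simp

theorem splitlines_break_cons (c : Char) (t : List Char) (hc : pyIsB c = true)
    (hcr : ¬ (c = '\r' ∧ t.head? = some '\n')) :
    PySem.Chars.splitlines (c :: t) = [] :: PySem.Chars.splitlines t := by
  rw [splitlines_eq, go_step pyIsB c t [] [] hcr, if_pos hc,
      go_acc pyIsB t.length t le_rfl [] _, splitlines_eq]
  simp

-- first-line decomposition of an arbitrary string
theorem firstline (s : List Char) :
    (∀ c ∈ s, pyIsB c = false) ∨
    ∃ x brk s', s = x ++ (brk ++ s') ∧ (∀ c ∈ x, pyIsB c = false) ∧ brk ≠ [] ∧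
      (∀ c ∈ brk, pyIsB c = true) ∧
      PySem.Chars.splitlines (brk ++ s') = [] :: PySem.Chars.splitlines s' := by
  induction s with
  | nil => left; simp
  | cons c t ih =>
    by_cases hc : pyIsB c = true
    · right
      by_cases hcr : c = '\r' ∧ t.head? = some '\n'
      · obtain ⟨rfl, hh⟩ := hcr
        cases t with
        | nil => simp at hh
        | cons d t' =>
          have hd : d = '\n' := by simpa using hh
          subst hd
          exact ⟨[], ['\r', '\n'], t', by simp, by simp, by simp, by intro c hc; fin_cases hc <;> rfl,
            splitlines_crlf t'⟩
      · exact ⟨[], [c], t, by simp, by simp, by simp,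
          by intro d hd; simp at hd; subst hd; exact hc,
          splitlines_break_cons c t hc hcr⟩
    · rcases ih with hbf | ⟨x, brk, s', rfl, hx, hbne, hbrk, hpeel⟩
      · left
        intro d hd
        rcases List.mem_cons.mp hd with rfl | hd
        · simpa using hc
        · exact hbf d hd
      · right
        exact ⟨c :: x, brk, s', by simp, by
          intro d hd
          rcases List.mem_cons.mp hd with rfl | hd
          · simpa using hc
          · exact hx d hd, hbne, hbrk, hpeel⟩

theorem lines_decomp (x brk s' : List Char) (hx : ∀ c ∈ x, pyIsB c = false)
    (hpeel : PySem.Chars.splitlines (brk ++ s') = [] :: PySem.Chars.splitlines s') :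
    PySem.Chars.splitlines (x ++ (brk ++ s')) = x :: PySem.Chars.splitlines s' := by
  rw [splitlines_append_breakfree x _ hx, hpeel]
  simp [glueLine]

-- ===== splitOnMax facts =====

theorem gs_fuel_zero (sep : List Char) (m : Nat) (l cur : List Char) (acc : List (List Char)) :
    PySem.Chars.splitOnMax.go sep 0 m l cur acc = ((cur.reverse ++ l) :: acc).reverse := rfl

theorem gs_nil (sep : List Char) (f m : Nat) (cur : List Char) (acc : List (List Char)) :
    PySem.Chars.splitOnMax.go sep (f + 1) m [] cur acc = (cur.reverse :: acc).reverse := rfl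

theorem gs_succ_cons (sep : List Char) (f m : Nat) (c : Char) (rest cur : List Char)
    (acc : List (List Char)) :
    PySem.Chars.splitOnMax.go sep (f + 1) m (c :: rest) cur acc =
      if m = 0 then ((cur.reverse ++ (c :: rest)) :: acc).reverse
      else if sep.isPrefixOf (c :: rest) then
        PySem.Chars.splitOnMax.go sep f (m - 1) ((c :: rest).drop sep.length) [] (cur.reverse :: acc)
      else PySem.Chars.splitOnMax.go sep f m rest (c :: cur) acc := rfl

theorem gs_m_zero (sep : List Char) : ∀ (f : Nat) (r : List Char) (acc : List (List Char)),
    PySem.Chars.splitOnMax.go sep f 0 r [] acc = (r :: acc).reverse := by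
  intro f r acc
  match f, r with
  | 0, r => rw [gs_fuel_zero]; simp
  | f + 1, [] => rw [gs_nil]; simp
  | f + 1, c :: rest => rw [gs_succ_cons]; simp

-- marker not occurring ⇒ a single piece
theorem gs_no_occ : ∀ (p : List Char) (f : Nat), p.length + 1 ≤ f →
    (∀ j, ¬ pvMark <+: p.drop j) → ∀ (cur : List Char) (acc : List (List Char)),
      PySem.Chars.splitOnMax.go pvMark f 1 p cur acc = ((cur.reverse ++ p) :: acc).reverse := by
  intro p
  induction p with
  | nil =>
    intro f hf _ cur acc
    cases f with
    | zero => omega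
    | succ f => rw [gs_nil]; simp
  | cons c rest ihp =>
    intro f hf hocc cur acc
    cases f with
    | zero => simp at hf
    | succ f =>
      rw [gs_succ_cons, if_neg (by omega)]
      cases hp : pvMark.isPrefixOf (c :: rest) with
      | true => exact absurd (List.isPrefixOf_iff_prefix.mp hp) (by simpa using hocc 0)
      | false =>
        simp only [Bool.false_eq_true, if_neg, not_false_eq_true]
        rw [ihp f (by simp at hf ⊢; omega) (fun j => by simpa using hocc (j + 1)) (c :: cur) acc]
        simp

-- marker occurring first right after p ⇒ exactly two pieces
theorem gs_first_occ : ∀ (p : List Char) (r : List Char) (f : Nat),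
    (p ++ (pvMark ++ r)).length + 1 ≤ f →
    (∀ j < p.length, ¬ pvMark <+: (p ++ (pvMark ++ r)).drop j) →
    ∀ (cur : List Char) (acc : List (List Char)),
      PySem.Chars.splitOnMax.go pvMark f 1 (p ++ (pvMark ++ r)) cur acc =
        (r :: (cur.reverse ++ p) :: acc).reverse := by
  intro p
  induction p with
  | nil =>
    intro r f hf _ cur acc
    cases f with
    | zero => simp at hf
    | succ f =>
      simp only [List.nil_append]
      have hne : ∃ c rest, pvMark ++ r = c :: rest := by
        match h : pvMark ++ r with
        | [] => exact absurd (List.append_eq_nil_iff.mp h).1 pvMark_ne_nil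
        | c :: rest => exact ⟨c, rest, rfl⟩
      obtain ⟨c, rest, hcr⟩ := hne
      rw [hcr, gs_succ_cons, if_neg (by omega), ← hcr,
          if_pos (List.isPrefixOf_iff_prefix.mpr (List.prefix_append _ _)),
          List.drop_left, gs_m_zero]
      simp
  | cons c t ihp =>
    intro r f hf hocc cur acc
    cases f with
    | zero => simp at hf
    | succ f =>
      rw [List.cons_append, gs_succ_cons, if_neg (by omega)]
      cases hp : pvMark.isPrefixOf (c :: (t ++ (pvMark ++ r))) with
      | true =>
        refine absurd ?_ (hocc 0 (by simp))
        have := List.isPrefixOf_iff_prefix.mp hp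
        simpa using this
      | false =>
        simp only [Bool.false_eq_true, if_neg, not_false_eq_true]
        have hocc' : ∀ j < t.length, ¬ pvMark <+: (t ++ (pvMark ++ r)).drop j := by
          intro j hj h
          exact hocc (j + 1) (by simp; omega) (by simpa using h)
        rw [ihp r f (by simp at hf ⊢; omega) hocc' (c :: cur) acc]
        simp

theorem splitOnMax_eq (s : List Char) :
    PySem.Chars.splitOnMax s pvMark 1 =
      PySem.Chars.splitOnMax.go pvMark (s.length + 1) 1 s [] [] := by
  rw [PySem.Chars.splitOnMax]
  norm_num

theorem splitOnMax_no (s : List Char) (h : ¬ pvMark <:+: s) :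
    PySem.Chars.splitOnMax s pvMark 1 = [s] := by
  rw [splitOnMax_eq, gs_no_occ s (s.length + 1) le_rfl]
  · simp
  · intro j hj
    exact h (hj.isInfix.trans (List.drop_suffix j s).isInfix)

theorem splitOnMax_first (p r : List Char)
    (hmin : ∀ j < p.length, ¬ pvMark <+: (p ++ (pvMark ++ r)).drop j) :
    PySem.Chars.splitOnMax (p ++ (pvMark ++ r)) pvMark 1 = [p, r] := by
  rw [splitOnMax_eq, gs_first_occ p r _ le_rfl hmin]
  simp

-- first occurrence decomposition from `find`
theorem first_occ (s : List Char) (h : pvMark <:+: s) :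
    ∃ p r, s = p ++ (pvMark ++ r) ∧ ∀ j < p.length, ¬ pvMark <+: s.drop j := by
  have hnn : 0 ≤ PySem.Chars.find s pvMark := (PySem.Chars.find_nonneg_iff s pvMark).mpr h
  obtain ⟨hpre, hmin⟩ := PySem.Chars.find_spec (s := s) (sub := pvMark) hnn
  obtain ⟨r, hr⟩ := hpre
  refine ⟨s.take (PySem.Chars.find s pvMark).toNat, r, ?_, ?_⟩
  · conv_lhs => rw [← List.take_append_drop (PySem.Chars.find s pvMark).toNat s]
    rw [← hr]
  · intro j hj
    apply hmin
    rw [List.length_take] at hj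
    omega

-- a prefix occurrence that fits inside the first block stays there
theorem prefix_of_fit (u x z : List Char) (j : Nat) (hfit : j + u.length ≤ x.length)
    (h : u <+: (x ++ z).drop j) : u <+: x.drop j := by
  have hd : (x ++ z).drop j = x.drop j ++ z := List.drop_append_of_le_length (by omega)
  rw [hd] at h
  have hlen : u.length ≤ (x.drop j).length := by simp [List.length_drop]; omega
  exact (List.isPrefix_append_of_length hlen).mp h

-- no occurrence of the marker can start inside the first line or its break
theorem occ_before (x brk s' : List Char) (hx : ¬ pvMark <:+: x)
    (hbrk : ∀ c ∈ brk, pyIsB c = true) (hbne : brk ≠ []) :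
    ∀ j < x.length + brk.length, ¬ pvMark <+: (x ++ (brk ++ s')).drop j := by
  intro j hj hpre
  by_cases hfit : j + pvMark.length ≤ x.length
  · exact hx (((prefix_of_fit pvMark x (brk ++ s') j hfit hpre).isInfix).trans
      (List.drop_suffix j x).isInfix)
  · have hbl : 0 < brk.length := List.length_pos_iff.mpr hbne
    have hM9 : pvMark.length = 9 := pvMark_length
    set q := max j x.length with hq
    have hk9 : q - j < pvMark.length := by omega
    have hjq : j ≤ q := le_max_left _ _
    have hqlt : q < (x ++ (brk ++ s')).length := by simp; omega
    have hgl : pvMark[q - j]'hk9 = (x ++ (brk ++ s'))[q]'hqlt := by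
      have h1 := hpre.getElem (i := q - j) hk9
      rw [h1]
      rw [List.getElem_drop]
      congr 1
      omega
    have hxq : x.length ≤ q := le_max_right _ _
    have hqb : q - x.length < brk.length := by omega
    have hg2 : (x ++ (brk ++ s'))[q]'hqlt = brk[q - x.length]'hqb := by
      rw [List.getElem_append_right (by omega)]
      rw [List.getElem_append_left]
    have hb : pyIsB (brk[q - x.length]'hqb) = true := hbrk _ (List.getElem_mem _)
    have hnb : pyIsB (pvMark[q - j]'hk9) = false := pvMark_breakfree _ (List.getElem_mem _)
    rw [hgl, hg2, hb] at hnb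
    exact absurd hnb (by simp)

-- the two identical fallback loops agree
theorem fallback_eq : ∀ ls, tldrFallback ls = tldrFirstNonEmpty ls := by
  intro ls
  induction ls with
  | nil => rfl
  | cons l rest ih => simp only [tldrFallback, tldrFirstNonEmpty, ih]

theorem scan_miss (l : List Char) (rest : List (List Char))
    (h : PySem.Chars.isIn "**TL;DR**".toList l = false) :
    tldrScan (l :: rest) = tldrScan rest := by
  simp only [tldrScan]
  rw [h]
  simp

theorem scan_hit (l a b : List Char) (rest : List (List Char))
    (h : PySem.Chars.isIn "**TL;DR**".toList l = true)
    (hsom : PySem.Chars.splitOnMax l "**TL;DR**".toList 1 = [a, b]) :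
    tldrScan (l :: rest) =
      if (PySem.Chars.stripChars b " :\t".toList).isEmpty then tldrFallback rest
      else some (PySem.Chars.stripChars b " :\t".toList) := by
  simp only [tldrScan]
  rw [h, hsom]
  simp [List.getD]

theorem coreB_hit (s a b : List Char)
    (hsom : PySem.Chars.splitOnMax s "**TL;DR**".toList 1 = [a, b]) :
    tldrCoreB s = tldrAfterMarker b := by
  simp only [tldrCoreB]
  rw [hsom]
  simp [List.getD]

theorem coreB_miss (s : List Char)
    (hsom : PySem.Chars.splitOnMax s "**TL;DR**".toList 1 = [s]) :
    tldrCoreB s = none := by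
  simp only [tldrCoreB]
  rw [hsom]
  simp

theorem afterMarker_cons (b h : List Char) (t : List (List Char))
    (hsl : PySem.Chars.splitlines b = h :: t) :
    tldrAfterMarker b =
      if (PySem.Chars.stripChars h " :\t".toList).isEmpty then tldrFirstNonEmpty t
      else some (PySem.Chars.stripChars h " :\t".toList) := by
  simp only [tldrAfterMarker]
  rw [hsl]

theorem afterMarker_nil (b : List Char) (hsl : PySem.Chars.splitlines b = []) :
    tldrAfterMarker b = none := by
  simp only [tldrAfterMarker]
  rw [hsl]

theorem stripChars_nil (chars : List Char) : PySem.Chars.stripChars [] chars = [] := rfl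

-- the main equivalence, by strong induction peeling one line at a time
theorem main_key : ∀ (n : Nat) (s : List Char), s.length ≤ n →
    tldrScan (PySem.Chars.splitlines s) = tldrCoreB s := by
  intro n
  induction n with
  | zero =>
    intro s hs
    have : s = [] := List.length_eq_zero_iff.mp (Nat.le_zero.mp hs)
    subst this
    decide
  | succ n ih =>
    intro s hs
    rcases firstline s with hbf | ⟨x, brk, s', rfl, hx, hbne, hbrk, hpeel⟩
    · -- s is a single (possibly empty) line
      by_cases hM : pvMark <:+: s
      · obtain ⟨p, r, rfl, hmin⟩ := first_occ s hM
        have hsne : p ++ (pvMark ++ r) ≠ [] := by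
          intro h
          exact pvMark_ne_nil (List.append_eq_nil_iff.mp ((List.append_eq_nil_iff.mp h).2)).1
        have hsl : PySem.Chars.splitlines (p ++ (pvMark ++ r)) = [p ++ (pvMark ++ r)] := by
          rw [splitlines_breakfree _ hbf, if_neg hsne]
        have hin : PySem.Chars.isIn "**TL;DR**".toList (p ++ (pvMark ++ r)) = true :=
          (PySem.Chars.isIn_iff_infix pvMark _).mpr ⟨p, r, by simp⟩
        have hsom : PySem.Chars.splitOnMax (p ++ (pvMark ++ r)) "**TL;DR**".toList 1 = [p, r] :=
          splitOnMax_first p r hmin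
        have hrbf : ∀ c ∈ r, pyIsB c = false := fun c hc => hbf c (by simp [hc])
        rw [hsl, scan_hit _ p r [] hin hsom, coreB_hit _ p r hsom]
        by_cases hr0 : r = []
        · subst hr0
          rw [afterMarker_nil [] rfl]
          simp [stripChars_nil, tldrFallback]
        · rw [afterMarker_cons r r [] (by rw [splitlines_breakfree r hrbf, if_neg hr0])]
          by_cases hh : (PySem.Chars.stripChars r " :\t".toList).isEmpty
          · rw [if_pos hh, if_pos hh]; rfl
          · rw [if_neg hh, if_neg hh]
      · -- no marker anywhere in the single line
        rw [coreB_miss s (splitOnMax_no s hM)]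
        by_cases hs0 : s = []
        · subst hs0; rfl
        · rw [splitlines_breakfree s hbf, if_neg hs0,
              scan_miss s [] ((PySem.Chars.isIn_eq_false_iff pvMark s).mpr hM)]
          rfl
    · -- s = x ++ (brk ++ s')
      have hlens' : s'.length ≤ n := by
        have h1 : 1 ≤ brk.length := List.length_pos_iff.mpr hbne
        simp at hs
        omega
      have hlines := lines_decomp x brk s' hx hpeel
      by_cases hMx : pvMark <:+: x
      · -- marker in the first line
        obtain ⟨px, rx, hx2, hminx⟩ := first_occ x hMx
        have hxlen : px.length + pvMark.length ≤ x.length := by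
          have := congrArg List.length hx2
          simp at this
          omega
        have hseq : x ++ (brk ++ s') = px ++ (pvMark ++ (rx ++ (brk ++ s'))) := by
          rw [hx2]; simp
        have hmins : ∀ j < px.length, ¬ pvMark <+: (px ++ (pvMark ++ (rx ++ (brk ++ s')))).drop j := by
          intro j hj hp
          rw [← hseq] at hp
          have := prefix_of_fit pvMark x (brk ++ s') j (by omega) hp
          exact hminx j hj (by rw [hx2] at this ⊢; exact this)
        have hsomS : PySem.Chars.splitOnMax (x ++ (brk ++ s')) "**TL;DR**".toList 1 =
            [px, rx ++ (brk ++ s')] := by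
          rw [hseq]
          exact splitOnMax_first px (rx ++ (brk ++ s')) hmins
        have hsomX : PySem.Chars.splitOnMax x "**TL;DR**".toList 1 = [px, rx] := by
          rw [hx2]
          exact splitOnMax_first px rx (by rw [← hx2]; exact hminx)
        have hrxbf : ∀ c ∈ rx, pyIsB c = false := fun c hc => hx c (by rw [hx2]; simp [hc])
        have hrlines : PySem.Chars.splitlines (rx ++ (brk ++ s')) = rx :: PySem.Chars.splitlines s' :=
          lines_decomp rx brk s' hrxbf hpeel
        have hin : PySem.Chars.isIn "**TL;DR**".toList x = true :=
          (PySem.Chars.isIn_iff_infix pvMark x).mpr hMx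
        rw [hlines, scan_hit x px rx _ hin hsomX, coreB_hit _ px (rx ++ (brk ++ s')) hsomS,
            afterMarker_cons _ rx (PySem.Chars.splitlines s') hrlines]
        by_cases hh : (PySem.Chars.stripChars rx " :\t".toList).isEmpty
        · rw [if_pos hh, if_pos hh]
          exact fallback_eq _
        · rw [if_neg hh, if_neg hh]
      · -- marker not in the first line: both sides reduce to s'
        have hin : PySem.Chars.isIn "**TL;DR**".toList x = false :=
          (PySem.Chars.isIn_eq_false_iff pvMark x).mpr hMx
        rw [hlines, scan_miss x _ hin, ih s' hlens']
        by_cases hMss : pvMark <:+: x ++ (brk ++ s')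
        · obtain ⟨u, v, huv⟩ := hMss
          have hL : x.length + brk.length ≤ u.length := by
            by_contra hlt
            refine occ_before x brk s' hMx hbrk hbne u.length (by omega) ?_
            rw [← huv, show u ++ pvMark ++ v = u ++ (pvMark ++ v) by simp, List.drop_left]
            exact List.prefix_append _ _
          have hdropL : (x ++ (brk ++ s')).drop (x.length + brk.length) = s' := by
            rw [show x ++ (brk ++ s') = (x ++ brk) ++ s' by simp,
                show x.length + brk.length = (x ++ brk).length by simp,
                List.drop_left]
          have hMs' : pvMark <:+: s' := by
            refine ⟨u.drop (x.length + brk.length), v, ?_⟩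
            rw [← hdropL, ← huv,
                show u ++ pvMark ++ v = u ++ (pvMark ++ v) by simp,
                List.drop_append_of_le_length (by omega)]
            simp
          obtain ⟨p', r', hs'2, hmin'⟩ := first_occ s' hMs'
          have hbig : x ++ (brk ++ s') = (x ++ (brk ++ p')) ++ (pvMark ++ r') := by
            rw [hs'2]; simp
          have hminbig : ∀ j < (x ++ (brk ++ p')).length,
              ¬ pvMark <+: ((x ++ (brk ++ p')) ++ (pvMark ++ r')).drop j := by
            intro j hj hp
            rw [← hbig] at hp
            by_cases hjL : j < x.length + brk.length
            · exact occ_before x brk s' hMx hbrk hbne j hjL hp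
            · have hdropj : (x ++ (brk ++ s')).drop j = s'.drop (j - (x.length + brk.length)) := by
                rw [show x ++ (brk ++ s') = (x ++ brk) ++ s' by simp]
                rw [show j = (x ++ brk).length + (j - (x.length + brk.length)) by simp; omega]
                rw [List.drop_length_add_append]
                congr 1
                simp
              rw [hdropj] at hp
              refine hmin' (j - (x.length + brk.length)) ?_ hp
              simp at hj
              omega
          have hsomBig : PySem.Chars.splitOnMax (x ++ (brk ++ s')) "**TL;DR**".toList 1 =
              [x ++ (brk ++ p'), r'] := by
            rw [hbig]
            exact splitOnMax_first _ _ hminbig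
          have hsomS' : PySem.Chars.splitOnMax s' "**TL;DR**".toList 1 = [p', r'] := by
            rw [hs'2]
            exact splitOnMax_first p' r' (by rw [← hs'2]; exact hmin')
          rw [coreB_hit _ _ _ hsomBig, coreB_hit _ _ _ hsomS']
        · have hMns' : ¬ pvMark <:+: s' := fun h => hMss (h.trans ⟨x ++ brk, [], by simp⟩)
          rw [coreB_miss _ (splitOnMax_no _ hMss), coreB_miss _ (splitOnMax_no _ hMns')]

-- ===== VERDICT (by name: the statement is the Claim_ definition above) =====
theorem extract_tldr_line_spec : Claim_equal_extract_tldr_line := by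
  intro markdown_body _
  unfold Spec_extract_tldr_line extract_tldr_line extract_tldr_line_alt
  rw [main_key (markdown_body.toList.length) markdown_body.toList le_rfl]
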